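-- pv_equiv track=rewrite | github.com/10XGenomics/cellranger | lib/python/cellranger/websummary/cmdline.py | preprocess_cmdline
-- ===== SOURCE A (Python) =====
-- def preprocess_cmdline(cmdline: str) -> str:
--     """Preprocess the command-line string to ensure correct argument formatting.
--
--     Args:
--         cmdline (str): The input command-line string.
--
--     Returns:
--         str: The preprocessed command-line string.
--     """
--     parts = cmdline.split(" ")
--     preprocessed_parts = []
--
--     i = 0
--     while i < len(parts):
--         part = parts[i]
--         if part.startswith("--"):
--             if i + 1 < len(parts) and not parts[i + 1].startswith("--"):
--                 # Check if the next part is not starting with "--"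
--                 preprocessed_parts.append(part + "=" + parts[i + 1].rstrip("/"))
--                 i += 1  # Skip the next part
--             else:
--                 preprocessed_parts.append(part)
--         else:
--             preprocessed_parts.append(part)
--         i += 1
--
--     return " ".join(preprocessed_parts)
-- ===== SOURCE B (Python) =====
-- def preprocess_cmdline(cmdline: str) -> str:
--     """Single forward pass with a pending flag token instead of index lookahead."""
--     out = []
--     pending = None  # a token starting with "--" waiting for its value
--     for part in cmdline.split(" "):
--         if pending is not None:
--             if part.startswith("--"):
--                 out.append(pending)
--                 pending = part
--             else:
--                 out.append(pending + "=" + part.rstrip("/"))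
--                 pending = None
--         elif part.startswith("--"):
--             pending = part
--         else:
--             out.append(part)
--     if pending is not None:
--         out.append(pending)
--     return " ".join(out)
-- ===== Notes on version B (the rewrite author's own statement) =====
-- stated objective: alternative
-- what changed: Replaced the index-based while loop with lookahead and skip (i incremented twice) by a single forward pass that carries the most recent unconsumed flag token in an accumulator and flushes it after the loop.
import Mathlib
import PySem

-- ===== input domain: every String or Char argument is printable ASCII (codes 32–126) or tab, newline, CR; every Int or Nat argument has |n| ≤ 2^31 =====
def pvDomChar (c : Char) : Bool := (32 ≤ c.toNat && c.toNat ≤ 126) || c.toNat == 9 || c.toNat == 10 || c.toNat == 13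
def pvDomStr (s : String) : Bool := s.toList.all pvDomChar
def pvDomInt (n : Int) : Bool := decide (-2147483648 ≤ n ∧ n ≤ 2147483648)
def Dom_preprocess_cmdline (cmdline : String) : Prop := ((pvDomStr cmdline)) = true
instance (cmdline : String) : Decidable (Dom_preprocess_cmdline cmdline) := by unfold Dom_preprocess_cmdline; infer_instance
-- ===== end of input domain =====

-- B replaces A's index-with-lookahead while loop by a single forward pass carrying the
-- latest unconsumed flag token; same cost, different decomposition (objective: alternative).

-- shared helper: Python's s.rstrip("/") — drop '/' characters from the end (exact:
-- rstrip(chars) removes trailing characters belonging to the given set, here just '/')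
def rstripSlash (s : String) : String :=
  String.mk ((s.toList.reverse.dropWhile (fun c => c == '/')).reverse)

-- ===== PORT A =====
-- A's while loop over index i, transliterated as recursion on the remaining parts:
-- parts[i] is the head, parts[i+1] the head of the tail; 'i += 1 twice' = drop two.
def loopA : List String → List String
  | [] => []
  | p :: rest =>
    if PySem.Str.startswith p "--" = true then
      match rest with
      | [] => p :: loopA []
      | q :: rest' =>
        if PySem.Str.startswith q "--" = true then p :: loopA (q :: rest')
        else (p ++ "=" ++ rstripSlash q) :: loopA rest'
    else p :: loopA rest

def preprocess_cmdline (cmdline : String) : String :=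
  let parts := (PySem.Str.split? cmdline " ").getD []  -- sep " " ≠ "" so split? is always some
  PySem.Str.join " " (loopA parts)

-- ===== PORT B =====
-- one step of Source B's loop: state = (output so far, reversed; pending flag token)
def stepB (st : List String × Option String) (part : String) : List String × Option String :=
  match st.2 with
  | some pend =>
    if PySem.Str.startswith part "--" = true then (pend :: st.1, some part)
    else ((pend ++ "=" ++ rstripSlash part) :: st.1, none)
  | none =>
    if PySem.Str.startswith part "--" = true then (st.1, some part)
    else (part :: st.1, none)

def preprocess_cmdline_alt (cmdline : String) : String :=
  let parts := (PySem.Str.split? cmdline " ").getD []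
  let st := parts.foldl stepB ([], none)
  let out := (match st.2 with | some p => p :: st.1 | none => st.1).reverse
  PySem.Str.join " " out

-- ===== PRECONDITION & SPEC =====
def Spec_preprocess_cmdline (cmdline : String) (out : String) : Prop := out = preprocess_cmdline_alt cmdline
instance (cmdline : String) (out : String) : Decidable (Spec_preprocess_cmdline cmdline out) := by unfold Spec_preprocess_cmdline; infer_instance

-- ===== CLAIM (what is proved, stated in full; the proofs are below) =====
def Claim_equal_preprocess_cmdline : Prop := ∀ (cmdline : String), Dom_preprocess_cmdline cmdline → Spec_preprocess_cmdline cmdline (preprocess_cmdline cmdline)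

-- ===== LEMMAS AND PROOFS =====

-- step equations for A's loop, one per branch of the while body
theorem loopA_nil : loopA [] = [] := rfl

theorem loopA_single (p : String) : loopA [p] = [p] := by
  simp only [loopA]; split <;> rfl

theorem loopA_flag_flag (p q : String) (ps : List String)
    (hp : PySem.Str.startswith p "--" = true) (hq : PySem.Str.startswith q "--" = true) :
    loopA (p :: q :: ps) = p :: loopA (q :: ps) := by
  simp only [loopA]; rw [if_pos hp, if_pos hq]

theorem loopA_flag_val (p q : String) (ps : List String)
    (hp : PySem.Str.startswith p "--" = true) (hq : ¬ PySem.Str.startswith q "--" = true) :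
    loopA (p :: q :: ps) = (p ++ "=" ++ rstripSlash q) :: loopA ps := by
  simp only [loopA]; rw [if_pos hp, if_neg hq]

theorem loopA_nonflag (p : String) (ps : List String)
    (hp : ¬ PySem.Str.startswith p "--" = true) : loopA (p :: ps) = p :: loopA ps := by
  cases ps <;> (simp only [loopA]; rw [if_neg hp])

-- finishing B's fold from state (acc, pend) yields acc (reversed) followed by what A's
-- loop produces on the pending token (if any, necessarily a "--" token) plus the rest
theorem runB_eq_loopA (ps : List String) : ∀ (acc : List String) (pend : Option String),
    (∀ p, pend = some p → PySem.Str.startswith p "--" = true) →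
    (match (ps.foldl stepB (acc, pend)).2 with
      | some p => p :: (ps.foldl stepB (acc, pend)).1
      | none => (ps.foldl stepB (acc, pend)).1).reverse
      = acc.reverse ++ loopA ((pend.toList) ++ ps) := by
  induction ps with
  | nil =>
    intro acc pend hp
    cases pend with
    | none => simp [loopA_nil]
    | some p => simp [Option.toList, loopA_single]
  | cons q ps ih =>
    intro acc pend hp
    cases pend with
    | none =>
      by_cases hq : PySem.Str.startswith q "--" = true
      · rw [List.foldl_cons,
          show stepB (acc, none) q = (acc, some q) from by
            dsimp only [stepB]; rw [if_pos hq],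
          ih acc (some q) (by intro r hr; cases hr; exact hq)]
        simp [Option.toList]
      · rw [List.foldl_cons,
          show stepB (acc, none) q = (q :: acc, none) from by
            dsimp only [stepB]; rw [if_neg hq],
          ih (q :: acc) none (by intro r h; cases h)]
        simp [Option.toList, loopA_nonflag q ps hq]
    | some p =>
      have hps := hp p rfl
      by_cases hq : PySem.Str.startswith q "--" = true
      · rw [List.foldl_cons,
          show stepB (acc, some p) q = (p :: acc, some q) from by
            dsimp only [stepB]; rw [if_pos hq],
          ih (p :: acc) (some q) (by intro r hr; cases hr; exact hq)]
        simp [Option.toList, loopA_flag_flag p q ps hps hq]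
      · rw [List.foldl_cons,
          show stepB (acc, some p) q = ((p ++ "=" ++ rstripSlash q) :: acc, none) from by
            dsimp only [stepB]; rw [if_neg hq],
          ih ((p ++ "=" ++ rstripSlash q) :: acc) none (by intro r h; cases h)]
        simp [Option.toList, loopA_flag_val p q ps hps hq]

-- ===== VERDICT (by name: the statement is the Claim_ definition above) =====
theorem preprocess_cmdline_spec : Claim_equal_preprocess_cmdline := by
  intro cmdline _
  unfold Spec_preprocess_cmdline preprocess_cmdline preprocess_cmdline_alt
  have h := runB_eq_loopA ((PySem.Str.split? cmdline " ").getD []) [] none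
    (by intro p h; cases h)
  simp only [Option.toList, List.nil_append, List.reverse_nil] at h
  dsimp only
  rw [h]
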